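-- pv_equiv track=rewrite | github.com/KrMrZero/lab | objects.py | reg
-- ===== SOURCE A (Python) =====
-- def reg(par, what):
--     S = ['A', 'B', 'C', 'D', 'E', 'F', 'G', 'H', 'I', 'J', 'K', 'L', 'M',
--          'N', 'O', 'P', 'Q', 'R', 'S', 'T', 'U', 'V', 'W', 'X', 'Y', 'Z']
--     s = ['a', 'b', 'c', 'd', 'e', 'f', 'g', 'h', 'i', 'j', 'k', 'l', 'm',
--          'n', 'o', 'p', 'q', 'r', 's', 't', 'u', 'v', 'w', 'x', 'y', 'z']
--
--     if (par[0] in s) and (what == 'mark' or what == 'model'):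
--         par = par.replace(par[0], S[s.index(par[0])], 1)
--         return par
--
--     elif what == 'num':
--         for i in par:
--             if i in s:
--                 par = par.replace(i, S[s.index(i)], 1)
--
--         return par
--
--     else:
--         return par
-- ===== SOURCE B (Python) =====
-- def reg(par, what):
--     first = par[0]
--     if 'a' <= first <= 'z' and (what == 'mark' or what == 'model'):
--         return first.upper() + par[1:]
--     if what == 'num':
--         return ''.join(c.upper() if 'a' <= c <= 'z' else c for c in par)
--     return par
-- ===== Notes on version B (the rewrite author's own statement) =====
-- stated objective: simpler
-- what changed: Replaces the 'num' branch's loop of repeated one-occurrence str.replace scans (quadratic rescanning plus list.index lookups into the letter tables) with a single per-character uppercasing pass, and builds the first branch by direct concatenation instead of replace; the letter tables and index lookups disappear.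
import Mathlib
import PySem

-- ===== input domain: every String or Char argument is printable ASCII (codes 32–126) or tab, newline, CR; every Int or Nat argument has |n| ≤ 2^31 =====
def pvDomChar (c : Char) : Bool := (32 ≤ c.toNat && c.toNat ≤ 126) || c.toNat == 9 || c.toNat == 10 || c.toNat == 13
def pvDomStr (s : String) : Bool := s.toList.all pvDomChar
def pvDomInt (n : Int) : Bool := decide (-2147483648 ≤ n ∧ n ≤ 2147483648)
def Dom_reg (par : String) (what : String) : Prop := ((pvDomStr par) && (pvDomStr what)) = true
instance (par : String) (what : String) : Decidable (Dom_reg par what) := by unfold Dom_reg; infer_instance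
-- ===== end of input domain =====

-- B replaces A's repeated one-occurrence `replace` scans by a single per-character
-- uppercasing pass (and builds the first branch by direct concatenation); objective: simpler.

-- ===== PORT A =====
-- A's literal table `S` of uppercase letters.
def regTabS : List Char := ['A','B','C','D','E','F','G','H','I','J','K','L','M',
                            'N','O','P','Q','R','S','T','U','V','W','X','Y','Z']
-- A's literal table `s` of lowercase letters.
def regTabs : List Char := ['a','b','c','d','e','f','g','h','i','j','k','l','m',
                            'n','o','p','q','r','s','t','u','v','w','x','y','z']

-- S[s.index(c)]; A only evaluates it when c ∈ s, so the totality defaults never fire.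
def regUpA (c : Char) : Char :=
  match PySem.List.index? regTabs c with
  | some k => regTabS.getD k c
  | none => c

-- par.replace(old, new, 1) for a single-character old/new: replace the first occurrence.
-- Exact: Python scans left to right and replaces at most one (single-char) match.
def replaceFirst : List Char → Char → Char → List Char
  | [], _, _ => []
  | x :: xs, old, new => if x = old then new :: xs else x :: replaceFirst xs old new

def reg (par : String) (what : String) : String :=
  match par.toList with
  | [] => ""  -- par[0] raises IndexError in Python; excluded by Pre_reg
  | c0 :: _ =>
    if c0 ∈ regTabs ∧ (what = "mark" ∨ what = "model") then
      String.ofList (replaceFirst par.toList c0 (regUpA c0))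
    else if what = "num" then
      String.ofList (par.toList.foldl
        (fun cur i => if i ∈ regTabs then replaceFirst cur i (regUpA i) else cur)
        par.toList)
    else par

-- ===== PORT B =====
def reg_alt (par : String) (what : String) : String :=
  match par.toList with
  | [] => ""  -- par[0] raises IndexError in Python; excluded by Pre_reg
  | c0 :: rest =>
    if ('a' ≤ c0 ∧ c0 ≤ 'z') ∧ (what = "mark" ∨ what = "model") then
      String.ofList (PySem.Chars.upperChar c0 :: rest)
    else if what = "num" then
      String.ofList (par.toList.map
        (fun c => if 'a' ≤ c ∧ c ≤ 'z' then PySem.Chars.upperChar c else c))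
    else par

-- ===== PRECONDITION & SPEC =====
-- Python A evaluates par[0] before anything else, so it raises IndexError on the empty string.
def Pre_reg (par : String) (what : String) : Prop := par ≠ ""
instance (par : String) (what : String) : Decidable (Pre_reg par what) := by
  unfold Pre_reg; infer_instance

def pvWitness_reg : String × String := ("abc", "num")

def Spec_reg (par : String) (what : String) (out : String) : Prop := out = reg_alt par what
instance (par : String) (what : String) (out : String) : Decidable (Spec_reg par what out) := by
  unfold Spec_reg; infer_instance

-- ===== CLAIM (what is proved, stated in full; the proofs are below) =====
def Claim_equal_reg : Prop :=
  ∀ (par : String) (what : String), Dom_reg par what → Pre_reg par what →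
    Spec_reg par what (reg par what)

-- ===== LEMMAS AND PROOFS =====

-- membership in A's lowercase table is exactly B's range test
lemma mem_regTabs_iff (c : Char) : c ∈ regTabs ↔ ('a' ≤ c ∧ c ≤ 'z') := by
  constructor
  · intro h; fin_cases h <;> decide
  · rintro ⟨h1, h2⟩
    have hc : c = Char.ofNat c.toNat := (Char.ofNat_toNat c).symm
    have hl : 97 ≤ c.toNat := h1
    have hr : c.toNat ≤ 122 := h2
    rw [hc]
    interval_cases h : c.toNat <;> decide

-- on A's lowercase table, A's S[s.index(c)] is B's upperChar
lemma regUpA_eq (c : Char) (h : c ∈ regTabs) : regUpA c = PySem.Chars.upperChar c := by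
  fin_cases h <;> decide

-- uppercasing a lowercase letter leaves the table
lemma regUpA_not_mem (c : Char) (h : c ∈ regTabs) : regUpA c ∉ regTabs := by
  fin_cases h <;> decide

lemma replaceFirst_append (xs ys : List Char) (old new : Char) (h : old ∉ xs) :
    replaceFirst (xs ++ ys) old new = xs ++ replaceFirst ys old new := by
  induction xs with
  | nil => rfl
  | cons x xs ih =>
    have hx : x ≠ old := fun e => h (e ▸ List.mem_cons_self ..)
    simp only [List.cons_append, replaceFirst, if_neg hx,
               ih (fun hm => h (List.mem_cons_of_mem _ hm))]

-- the num-branch loop invariant: once the prefix carries no lowercase letter,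
-- folding A's one-occurrence replaces over the suffix uppercases it in place
lemma foldl_replace_eq_map (suf : List Char) : ∀ (pre : List Char),
    (∀ c ∈ pre, c ∉ regTabs) →
    suf.foldl
      (fun cur i => if i ∈ regTabs then replaceFirst cur i (regUpA i) else cur)
      (pre ++ suf)
    = pre ++ suf.map (fun c => if 'a' ≤ c ∧ c ≤ 'z' then PySem.Chars.upperChar c else c) := by
  induction suf with
  | nil => intro pre _; simp
  | cons i suf ih =>
    intro pre hpre
    by_cases hi : i ∈ regTabs
    · have hnotpre : i ∉ pre := fun hm => hpre i hm hi
      have hstep : replaceFirst (pre ++ i :: suf) i (regUpA i) = pre ++ regUpA i :: suf := by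
        rw [replaceFirst_append _ _ _ _ hnotpre]; simp [replaceFirst]
      have hpre' : ∀ c ∈ pre ++ [regUpA i], c ∉ regTabs := by
        intro c hc
        rcases List.mem_append.mp hc with h | h
        · exact hpre c h
        · rcases List.mem_singleton.mp h with rfl
          exact regUpA_not_mem i hi
      calc (i :: suf).foldl _ (pre ++ i :: suf)
          = suf.foldl _ ((pre ++ [regUpA i]) ++ suf) := by
            simp [List.foldl_cons, if_pos hi, hstep]
        _ = (pre ++ [regUpA i]) ++ suf.map _ := ih (pre ++ [regUpA i]) hpre'
        _ = pre ++ (i :: suf).map _ := by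
            simp [List.map_cons, if_pos ((mem_regTabs_iff i).mp hi), regUpA_eq i hi]
    · have hup : ¬ ('a' ≤ i ∧ i ≤ 'z') := fun h => hi ((mem_regTabs_iff i).mpr h)
      have hpre' : ∀ c ∈ pre ++ [i], c ∉ regTabs := by
        intro c hc
        rcases List.mem_append.mp hc with h | h
        · exact hpre c h
        · rcases List.mem_singleton.mp h with rfl; exact hi
      calc (i :: suf).foldl _ (pre ++ i :: suf)
          = suf.foldl _ ((pre ++ [i]) ++ suf) := by
            simp [List.foldl_cons, if_neg hi]
        _ = (pre ++ [i]) ++ suf.map _ := ih (pre ++ [i]) hpre'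
        _ = pre ++ (i :: suf).map _ := by simp [List.map_cons, if_neg hup]

-- ===== VERDICT (by name: the statement is the Claim_ definition above) =====
theorem reg_spec : Claim_equal_reg := by
  intro par what _ _
  unfold Spec_reg reg reg_alt
  rcases hl : par.toList with _ | ⟨c0, rest⟩
  · rfl
  · have hnum := foldl_replace_eq_map (c0 :: rest) [] (by simp)
    simp only [List.nil_append] at hnum
    simp only [mem_regTabs_iff] at hnum ⊢
    split_ifs with h1 h2
    · have hc : c0 ∈ regTabs := (mem_regTabs_iff c0).mpr h1.1
      simp [replaceFirst, regUpA_eq c0 hc]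
    · exact congrArg String.ofList hnum
    · rfl
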